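-- pv_equiv track=rewrite | github.com/sandahltim/StardewAI | scripts/build_game_knowledge_db.py | find_seed_for_crop
-- ===== SOURCE A (Python) =====
-- def find_seed_for_crop(crop_name, seed_rows):
--     crop_lower = crop_name.lower()
--     candidates = []
--     for row in seed_rows:
--         seed_name = row.get("English Name") or row.get("Name") or ""
--         if crop_lower in seed_name.lower():
--             candidates.append(row)
--     if not candidates:
--         return None
--     for row in candidates:
--         if "seed" in (row.get("English Name") or "").lower():
--             return row
--     return candidates[0]
-- ===== SOURCE B (Python) =====
-- def find_seed_for_crop(crop_name, seed_rows):
--     crop_lower = crop_name.lower()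
--     first_candidate = None
--     for row in seed_rows:
--         match_name = row.get("English Name") or row.get("Name") or ""
--         if crop_lower in match_name.lower():
--             if "seed" in (row.get("English Name") or "").lower():
--                 return row
--             if first_candidate is None:
--                 first_candidate = row
--     return first_candidate
-- ===== Notes on version B (the rewrite author's own statement) =====
-- stated objective: simpler
-- what changed: Single pass with a first_candidate variable and early return on a seed-named match, replacing the intermediate candidates list and the second rescan pass.
import Mathlib
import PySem

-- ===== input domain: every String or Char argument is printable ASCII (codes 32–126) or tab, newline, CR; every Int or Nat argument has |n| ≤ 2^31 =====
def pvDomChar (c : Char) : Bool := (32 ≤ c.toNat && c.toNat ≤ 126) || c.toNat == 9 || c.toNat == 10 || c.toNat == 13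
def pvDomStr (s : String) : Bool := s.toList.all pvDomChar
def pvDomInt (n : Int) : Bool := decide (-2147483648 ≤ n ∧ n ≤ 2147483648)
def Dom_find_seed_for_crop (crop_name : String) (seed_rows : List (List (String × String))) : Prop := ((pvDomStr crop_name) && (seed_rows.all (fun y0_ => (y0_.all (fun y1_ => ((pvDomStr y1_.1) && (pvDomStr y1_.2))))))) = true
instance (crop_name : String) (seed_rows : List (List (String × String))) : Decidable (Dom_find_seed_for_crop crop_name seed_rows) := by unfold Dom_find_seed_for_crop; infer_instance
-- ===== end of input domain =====

-- B replaces A's candidates list and second rescan pass by one pass with a first_candidate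
-- variable and an early return; objective: simpler. Return values proved equal on all inputs.

-- shared helpers: row.get(k) on an assoc-list dict, and Python's `x or y` on strings ('' is falsy)
def pvGetRow (row : List (String × String)) (k : String) : Option String :=
  (PySem.Dict.mk row).get? k

def pvOrStr (o : Option String) (b : String) : String :=
  match o with
  | some s => if s = "" then b else s
  | none => b

-- seed_name = row.get("English Name") or row.get("Name") or ""
def pvSeedName (row : List (String × String)) : String :=
  pvOrStr (pvGetRow row "English Name") (pvOrStr (pvGetRow row "Name") "")

-- crop_lower in seed_name.lower()
def pvMatchRow (cl : String) (row : List (String × String)) : Bool :=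
  PySem.Str.isIn cl (PySem.Str.lower (pvSeedName row))

-- "seed" in (row.get("English Name") or "").lower()
def pvEngSeed (row : List (String × String)) : Bool :=
  PySem.Str.isIn "seed" (PySem.Str.lower (pvOrStr (pvGetRow row "English Name") ""))

-- ===== PORT A =====
-- second loop of A: first candidate whose English Name contains "seed"
def pvALoop2 : List (List (String × String)) → Option (List (String × String))
  | [] => none
  | r :: rs => if pvEngSeed r then some r else pvALoop2 rs

def find_seed_for_crop (crop_name : String) (seed_rows : List (List (String × String))) : Option (List (String × String)) :=
  let crop_lower := PySem.Str.lower crop_name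
  let candidates := seed_rows.foldl (fun acc row => if pvMatchRow crop_lower row then acc ++ [row] else acc) []
  if candidates.isEmpty then none
  else
    match pvALoop2 candidates with
    | some r => some r
    | none => candidates.head?   -- candidates[0]; candidates is nonempty here

-- ===== PORT B =====
-- single pass carrying first_candidate; early return on a seed-named match
def pvBLoop (cl : String) : List (List (String × String)) → Option (List (String × String)) → Option (List (String × String))
  | [], fc => fc
  | row :: rest, fc =>
    if pvMatchRow cl row then
      if pvEngSeed row then some row
      else pvBLoop cl rest (if fc.isNone then some row else fc)
    else pvBLoop cl rest fc

def find_seed_for_crop_alt (crop_name : String) (seed_rows : List (List (String × String))) : Option (List (String × String)) :=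
  pvBLoop (PySem.Str.lower crop_name) seed_rows none

-- ===== PRECONDITION & SPEC =====
def Spec_find_seed_for_crop (crop_name : String) (seed_rows : List (List (String × String))) (out : Option (List (String × String))) : Prop := out = find_seed_for_crop_alt crop_name seed_rows
instance (crop_name : String) (seed_rows : List (List (String × String))) (out : Option (List (String × String))) : Decidable (Spec_find_seed_for_crop crop_name seed_rows out) := by unfold Spec_find_seed_for_crop; infer_instance

-- ===== CLAIM (what is proved, stated in full; the proofs are below) =====
def Claim_equal_find_seed_for_crop : Prop := ∀ (crop_name : String) (seed_rows : List (List (String × String))), Dom_find_seed_for_crop crop_name seed_rows → Spec_find_seed_for_crop crop_name seed_rows (find_seed_for_crop crop_name seed_rows)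

-- ===== LEMMAS AND PROOFS =====
theorem pv_fold_filter (cl : String) (rows : List (List (String × String))) (init : List (List (String × String))) :
    rows.foldl (fun acc row => if pvMatchRow cl row then acc ++ [row] else acc) init
      = init ++ rows.filter (fun r => pvMatchRow cl r) := by
  induction rows generalizing init with
  | nil => simp
  | cons r rs ih =>
    simp only [List.foldl_cons, List.filter_cons]
    by_cases h : pvMatchRow cl r <;> simp [h, ih]

theorem pvBLoop_eq (cl : String) (rows : List (List (String × String))) (fc : Option (List (String × String))) :
    pvBLoop cl rows fc
      = match pvALoop2 (rows.filter (fun r => pvMatchRow cl r)) with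
        | some r => some r
        | none => fc.or (rows.filter (fun r => pvMatchRow cl r)).head? := by
  induction rows generalizing fc with
  | nil => cases fc <;> simp [pvBLoop, pvALoop2, Option.or]
  | cons r rs ih =>
    by_cases hm : pvMatchRow cl r
    · by_cases hs : pvEngSeed r
      · simp [pvBLoop, hm, hs, pvALoop2]
      · simp only [pvBLoop, hm, if_true, hs, List.filter_cons]
        rw [ih]
        cases fc <;> simp [pvALoop2, hs, Option.or]
    · simp [pvBLoop, hm, ih]

-- ===== VERDICT (by name: the statement is the Claim_ definition above) =====
theorem find_seed_for_crop_spec : Claim_equal_find_seed_for_crop := by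
  intro crop_name seed_rows _
  unfold Spec_find_seed_for_crop find_seed_for_crop find_seed_for_crop_alt
  simp only [pv_fold_filter, pvBLoop_eq]
  cases hf : seed_rows.filter (fun r => pvMatchRow (PySem.Str.lower crop_name) r) with
  | nil => simp [pvALoop2]
  | cons a l =>
    simp only [List.nil_append, List.isEmpty_cons, Bool.false_eq_true, if_false]
    cases pvALoop2 (a :: l) <;> simp [Option.or]
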